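-- pv_equiv track=rewrite | github.com/GitMonsters/octotetrahedral-agi | arc-puzzle-catalog/solves/34792bdd/solver.py | transform
-- ===== SOURCE A (Python) =====
-- def transform(grid):
--     from collections import Counter
--     H, W = len(grid), len(grid[0])
--     flat = [v for row in grid for v in row]
--     bg = Counter(flat).most_common(1)[0][0]
--
--     out = [row[:] for row in grid]
--
--     input_colors = set(flat)
--     fill = 8
--     if fill in input_colors:
--         for f in range(10):
--             if f not in input_colors:
--                 fill = f
--                 break
--
--     for col in range(W):
--         vals = [grid[r][col] for r in range(H)]
--         non_bg = [r for r in range(H) if vals[r] != bg]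
--         if not non_bg:
--             continue
--
--         segments = []
--         start = non_bg[0]
--         for i in range(1, len(non_bg)):
--             if non_bg[i] != non_bg[i-1] + 1:
--                 segments.append((start, non_bg[i-1]))
--                 start = non_bg[i]
--         segments.append((start, non_bg[-1]))
--
--         for s, e in segments:
--             touches_top = s == 0
--             touches_bottom = e == H - 1
--             if touches_top == touches_bottom:
--                 continue
--
--             if touches_top:
--                 gap_clean = all(vals[r] == bg for r in range(e+1, H))
--                 gap_range = range(e+1, H)
--             else:
--                 gap_clean = all(vals[r] == bg for r in range(0, s))
--                 gap_range = range(0, s)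
--
--             if not gap_clean:
--                 continue
--
--             isolated = True
--             for r in range(s, e+1):
--                 if col > 0 and grid[r][col-1] != bg:
--                     isolated = False
--                     break
--                 if col < W-1 and grid[r][col+1] != bg:
--                     isolated = False
--                     break
--
--             if not isolated:
--                 continue
--
--             for r in gap_range:
--                 out[r][col] = fill
--
--     return out
-- ===== SOURCE B (Python) =====
-- def transform(grid):
--     from collections import Counter
--     H, W = len(grid), len(grid[0])
--     flat = [v for row in grid for v in row]
--     bg = Counter(flat).most_common(1)[0][0]
--
--     input_colors = set(flat)
--     fill = 8
--     if fill in input_colors: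
--         for f in range(10):
--             if f not in input_colors:
--                 fill = f
--                 break
--
--     out = [row[:] for row in grid]
--     for col in range(W):
--         non_bg = [r for r in range(H) if grid[r][col] != bg]
--         if not non_bg:
--             continue
--         a, b = non_bg[0], non_bg[-1]
--         if non_bg != list(range(a, b + 1)):
--             continue  # more than one non-bg run in this column
--         if (a == 0) == (b == H - 1):
--             continue  # touches both edges or neither
--         if not all((col == 0 or grid[r][col - 1] == bg)
--                    and (col == W - 1 or grid[r][col + 1] == bg)
--                    for r in range(a, b + 1)):
--             continue  # not isolated
--         gap = range(b + 1, H) if a == 0 else range(0, a)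
--         for r in gap:
--             out[r][col] = fill
--     return out
-- ===== Notes on version B (the rewrite author's own statement) =====
-- stated objective: simpler
-- what changed: Per column, B replaces A's segment-building fold plus per-segment gap-clean scan by a direct test that the column's non-background rows form a single contiguous run touching exactly one edge (the only configuration A's gap-clean filter can ever accept), then checks isolation and fills the opposite gap; the Counter-based background choice and fill-colour fallback are kept verbatim.
import Mathlib
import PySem

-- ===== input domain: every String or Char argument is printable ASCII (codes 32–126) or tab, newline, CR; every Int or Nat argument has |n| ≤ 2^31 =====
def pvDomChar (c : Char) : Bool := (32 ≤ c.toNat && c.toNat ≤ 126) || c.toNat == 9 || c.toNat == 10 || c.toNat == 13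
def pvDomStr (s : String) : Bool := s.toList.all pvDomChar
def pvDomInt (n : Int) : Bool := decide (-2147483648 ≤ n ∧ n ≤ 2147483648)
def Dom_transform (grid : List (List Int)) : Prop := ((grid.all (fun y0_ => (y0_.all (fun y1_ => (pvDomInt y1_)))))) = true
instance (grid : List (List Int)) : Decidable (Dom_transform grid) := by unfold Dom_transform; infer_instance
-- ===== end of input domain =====

-- B replaces A's per-column segment-building fold (and its separate gap-clean scan) by a direct
-- "single contiguous non-bg run touching exactly one edge" test: a simpler decomposition, same
-- return value (A mutates only its own fresh copy of the grid, so only the return value matters).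

-- ===== PORT A =====
-- shared helper: grid[r][c] for the row/column indices of the loops (they are always ≥ 0 there,
-- so getD at toNat is exact)
def pvCell (grid : List (List Int)) (r c : Int) : Int :=
  PySem.List.pyGetD (PySem.List.pyGetD grid r []) c 0

-- shared helper: out[r][col] = v (both Pythons contain this identical statement)
def pvSetCell (out : List (List Int)) (r c v : Int) : List (List Int) :=
  PySem.List.pySetD out r (PySem.List.pySetD (PySem.List.pyGetD out r []) c v)

-- shared helper: bg = Counter(flat).most_common(1)[0][0]
-- (most_common(1) = first element of the count-descending stable sort of the counter's items)
def pvBg (flat : List Int) : Int :=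
  (PySem.List.pyGetD (PySem.List.sorted (PySem.Dict.counter flat).items (fun p => p.2) true) 0 (0, 0)).1

-- shared helper: the fill-colour fallback search (identical lines in both Pythons)
def pvFill (flat : List Int) : Int :=
  let colors : PySem.Set Int := PySem.Set.ofList flat
  if PySem.Set.contains colors 8 then
    match (PySem.List.pyRange 0 10 1).find? (fun f => !(PySem.Set.contains colors f)) with
    | some f => f
    | none => 8
  else 8

-- A's segment builder: the start/append fold over i in range(1, len(non_bg))
def pvSegments (nonBg : List Int) : List (Int × Int) :=
  let fs := (PySem.List.pyRange 1 (nonBg.length : Int) 1).foldl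
    (fun (p : List (Int × Int) × Int) i =>
      if !(PySem.List.pyGetD nonBg i 0 == PySem.List.pyGetD nonBg (i - 1) 0 + 1) then
        (p.1 ++ [(p.2, PySem.List.pyGetD nonBg (i - 1) 0)], PySem.List.pyGetD nonBg i 0)
      else p)
    ([], PySem.List.pyGetD nonBg 0 0)
  fs.1 ++ [(fs.2, (PySem.List.pyGet? nonBg (-1)).getD 0)]

-- A's body of 'for col in range(W)'
def pvColA (grid : List (List Int)) (H W bg fill : Int) (out : List (List Int)) (col : Int) :
    List (List Int) :=
  let vals := (PySem.List.pyRange 0 H 1).map (fun r => pvCell grid r col)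
  let nonBg := (PySem.List.pyRange 0 H 1).filter (fun r => !(PySem.List.pyGetD vals r 0 == bg))
  if nonBg = [] then out
  else
    (pvSegments nonBg).foldl (fun out se =>
      let s := se.1
      let e := se.2
      let touchesTop := s == 0
      let touchesBottom := e == H - 1
      if touchesTop == touchesBottom then out
      else
        let gapClean := if touchesTop then
            (PySem.List.pyRange (e + 1) H 1).all (fun r => PySem.List.pyGetD vals r 0 == bg)
          else
            (PySem.List.pyRange 0 s 1).all (fun r => PySem.List.pyGetD vals r 0 == bg)
        let gapRange := if touchesTop then PySem.List.pyRange (e + 1) H 1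
          else PySem.List.pyRange 0 s 1
        if !gapClean then out
        else
          let isolated := (PySem.List.pyRange s (e + 1) 1).foldl
            (fun iso r =>
              if iso then
                if 0 < col ∧ ¬(pvCell grid r (col - 1) = bg) then false
                else if col < W - 1 ∧ ¬(pvCell grid r (col + 1) = bg) then false
                else true
              else iso)
            true
          if !isolated then out
          else gapRange.foldl (fun o r => pvSetCell o r col fill) out) out

def transform (grid : List (List Int)) : List (List Int) :=
  let H : Int := grid.length
  let W : Int := (PySem.List.pyGetD grid 0 []).length
  let flat := grid.flatMap (fun row => row)
  let bg := pvBg flat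
  let out := grid.map (fun row => PySem.List.slice row none none)   -- row[:]
  let fill := pvFill flat
  (PySem.List.pyRange 0 W 1).foldl (pvColA grid H W bg fill) out

-- ===== PORT B =====
-- B's body of 'for col in range(W)': single-contiguous-run test, no segment fold
def pvColB (grid : List (List Int)) (H W bg fill : Int) (out : List (List Int)) (col : Int) :
    List (List Int) :=
  let nonBg := (PySem.List.pyRange 0 H 1).filter (fun r => !(pvCell grid r col == bg))
  if nonBg = [] then out
  else
    let a := PySem.List.pyGetD nonBg 0 0
    let b := (PySem.List.pyGet? nonBg (-1)).getD 0
    if nonBg ≠ PySem.List.pyRange a (b + 1) 1 then out   -- more than one non-bg run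
    else if (a == 0) == (b == H - 1) then out            -- touches both edges or neither
    else if !((PySem.List.pyRange a (b + 1) 1).all (fun r =>
        ((col == 0 || pvCell grid r (col - 1) == bg) &&
         (col == W - 1 || pvCell grid r (col + 1) == bg)))) then out
    else
      let gap := if a == 0 then PySem.List.pyRange (b + 1) H 1 else PySem.List.pyRange 0 a 1
      gap.foldl (fun o r => pvSetCell o r col fill) out

def transform_alt (grid : List (List Int)) : List (List Int) :=
  let H : Int := grid.length
  let W : Int := (PySem.List.pyGetD grid 0 []).length
  let flat := grid.flatMap (fun row => row)
  let bg := pvBg flat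
  let fill := pvFill flat
  let out := grid.map (fun row => PySem.List.slice row none none)   -- row[:]
  (PySem.List.pyRange 0 W 1).foldl (pvColB grid H W bg fill) out

-- ===== PRECONDITION & SPEC =====
-- Pre_ excludes exactly the inputs where A raises IndexError: the empty grid, a grid with only
-- empty rows (Counter().most_common(1)[0] fails), and grids whose first row is non-empty while
-- some row is shorter than it (grid[r][col] out of range in the column scan).
def Pre_transform (grid : List (List Int)) : Prop :=
  grid ≠ [] ∧
  ((grid.headI.length = 0 ∧ ∃ row ∈ grid, row ≠ []) ∨
   (0 < grid.headI.length ∧ ∀ row ∈ grid, grid.headI.length ≤ row.length))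
instance (grid : List (List Int)) : Decidable (Pre_transform grid) := by
  unfold Pre_transform; infer_instance

def pvWitness_transform : List (List Int) := [[1, 1], [1, 0]]

def Spec_transform (grid : List (List Int)) (out : List (List Int)) : Prop := out = transform_alt grid
instance (grid : List (List Int)) (out : List (List Int)) : Decidable (Spec_transform grid out) := by unfold Spec_transform; infer_instance

-- ===== CLAIM (what is proved, stated in full; the proofs are below) =====
def Claim_equal_transform : Prop := ∀ (grid : List (List Int)), Dom_transform grid → Pre_transform grid → Spec_transform grid (transform grid)

-- ===== LEMMAS AND PROOFS =====

-- structural view of A's segment fold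
def segGo (st p : Int) : List Int → List (Int × Int)
  | [] => [(st, p)]
  | x :: xs => if x = p + 1 then segGo st x xs else (st, p) :: segGo x x xs

def pairsFold {β : Type} (g : β → Int → Int → β) : Int → List Int → β → β
  | _, [], init => init
  | a, x :: xs, init => pairsFold g x xs (g init a x)

def segG (p : List (Int × Int) × Int) (prev cur : Int) : List (Int × Int) × Int :=
  if !(cur == prev + 1) then (p.1 ++ [(p.2, prev)], cur) else p

theorem foldl_range_pairs {β : Type} (g : β → Int → Int → β) :
    ∀ (xs : List Int) (a : Int) (init : β),
      (List.range xs.length).foldl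
        (fun b j => g b ((a :: xs).getD j 0) (xs.getD j 0)) init
      = pairsFold g a xs init := by
  intro xs
  induction xs with
  | nil => intro a init; simp [pairsFold]
  | cons x xs ih =>
    intro a init
    rw [List.length_cons, List.range_succ_eq_map, List.foldl_cons, List.foldl_map]
    simpa [pairsFold] using ih x (g init a x)

theorem pairs_segGo : ∀ (xs : List Int) (p st : Int) (acc : List (Int × Int)),
    (pairsFold segG p xs (acc, st)).1
      ++ [((pairsFold segG p xs (acc, st)).2, ((p :: xs).getLast?).getD 0)]
    = acc ++ segGo st p xs := by
  intro xs
  induction xs with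
  | nil => intro p st acc; simp [pairsFold, segGo]
  | cons x xs ih =>
    intro p st acc
    by_cases hx : x = p + 1
    · have hg : segG (acc, st) p x = (acc, st) := by simp [segG, hx]
      simp only [pairsFold, hg, segGo, if_pos hx]
      simpa using ih x st acc
    · have hg : segG (acc, st) p x = (acc ++ [(st, p)], x) := by simp [segG, hx]
      simp only [pairsFold, hg, segGo, if_neg hx]
      rw [show acc ++ (st, p) :: segGo x x xs = (acc ++ [(st, p)]) ++ segGo x x xs by simp]
      simpa using ih x x (acc ++ [(st, p)])

theorem pvSegments_cons (a : Int) (xs : List Int) :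
    pvSegments (a :: xs) = segGo a a xs := by
  unfold pvSegments
  simp only [List.length_cons]
  rw [PySem.List.pyRange_one]
  have hn : ((((xs.length + 1 : Nat)) : Int) - 1).toNat = xs.length := by
    push_cast; omega
  rw [hn, List.foldl_map]
  rw [PySem.List.foldl_congr_mem _ _
      (fun b (j : Nat) => segG b ((a :: xs).getD j 0) (xs.getD j 0)) _
      (fun b j hj => by
        have h1 : (1 : Int) + (j : Int) = ((j + 1 : Nat) : Int) := by push_cast; ring
        have h3 : PySem.List.pyGetD (a :: xs) ((j : Int) + 1) 0 = xs[j]?.getD 0 := by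
          rw [show ((j : Int) + 1) = ((j + 1 : Nat) : Int) by push_cast; ring,
            PySem.List.pyGetD_natCast]
          simp
        simp [h1, h3, segG, PySem.List.pyGetD_natCast])]
  rw [foldl_range_pairs segG xs a ([], PySem.List.pyGetD (a :: xs) 0 0)]
  rw [PySem.List.pyGetD_zero_cons, PySem.List.pyGet?_neg_one]
  exact pairs_segGo xs a a []

theorem segGo_chain : ∀ (xs : List Int) (p st : Int),
    List.IsChain (fun u v => v = u + 1) (p :: xs) →
    segGo st p xs = [(st, ((p :: xs).getLast?).getD 0)] := by
  intro xs
  induction xs with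
  | nil => intro p st _; simp [segGo]
  | cons x xs ih =>
    intro p st hc
    rw [List.isChain_cons] at hc
    have hx : x = p + 1 := hc.1 x (by simp)
    simp only [segGo, if_pos hx]
    simpa using ih x st hc.2

theorem segGo_run : ∀ (xs : List Int) (p st s e : Int) (L : List Int),
    (∀ r : Int, st ≤ r → r ≤ p → r ∈ L) → (∀ x ∈ xs, x ∈ L) →
    (s, e) ∈ segGo st p xs →
    ∀ r : Int, s ≤ r → r ≤ e → r ∈ L := by
  intro xs
  induction xs with
  | nil =>
    intro p st s e L hrun _ hm
    simp [segGo] at hm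
    exact hm.1 ▸ hm.2 ▸ hrun
  | cons x xs ih =>
    intro p st s e L hrun hxs hm
    by_cases hx : x = p + 1
    · rw [segGo, if_pos hx] at hm
      refine ih x st s e L (fun r h1 h2 => ?_) (fun y hy => hxs y (by simp [hy])) hm
      by_cases hrp : r ≤ p
      · exact hrun r h1 hrp
      · have : r = x := by omega
        exact this ▸ hxs x (by simp)
    · rw [segGo, if_neg hx] at hm
      rcases List.mem_cons.mp hm with h | h
      · have hs : s = st := (Prod.mk.injEq .. ▸ h).1
        have he : e = p := (Prod.mk.injEq .. ▸ h).2
        exact fun r h1 h2 => hrun r (hs ▸ h1) (he ▸ h2)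
      · refine ih x x s e L (fun r h1 h2 => ?_) (fun y hy => hxs y (by simp [hy])) h
        have : r = x := by omega
        exact this ▸ hxs x (by simp)

theorem chain_pyRange_one : ∀ (n : Nat) (a b : Int), (b - a).toNat = n →
    List.IsChain (fun u v => v = u + 1) (PySem.List.pyRange a b 1) := by
  intro n
  induction n with
  | zero => intro a b h; rw [PySem.List.pyRange_one_eq_nil (by omega)]; exact List.IsChain.nil
  | succ n ih =>
    intro a b h
    rw [PySem.List.pyRange_one_cons (by omega)]
    rcases Nat.eq_zero_or_pos n with h0 | h0
    · rw [PySem.List.pyRange_one_eq_nil (by omega)]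
      exact List.IsChain.singleton a
    · rw [PySem.List.pyRange_one_cons (by omega)]
      rw [List.isChain_cons]
      refine ⟨by simp, ?_⟩
      rw [← PySem.List.pyRange_one_cons (by omega)]
      exact ih (a + 1) b (by omega)

theorem eq_pyRange_of (l : List Int) (s e : Int) (hp : l.Pairwise (· < ·))
    (hsub : ∀ x ∈ l, s ≤ x ∧ x ≤ e) (hsup : ∀ r : Int, s ≤ r → r ≤ e → r ∈ l) :
    l = PySem.List.pyRange s (e + 1) 1 := by
  have hnd : l.Nodup := hp.imp (fun h => ne_of_lt h)
  have hperm : l.Perm (PySem.List.pyRange s (e + 1) 1) := by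
    refine (List.perm_ext_iff_of_nodup hnd (PySem.List.nodup_pyRange_one _ _)).mpr (fun x => ?_)
    rw [PySem.List.mem_pyRange_one]
    constructor
    · intro hx; have := hsub x hx; omega
    · intro hx; exact hsup x hx.1 (by omega)
  have h1 : PySem.List.sorted l (fun x => x) = l :=
    PySem.List.sorted_eq_of_perm_of_pairwise_lt l l _ (List.Perm.refl l) hp
  have h2 : PySem.List.sorted l (fun x => x) = PySem.List.pyRange s (e + 1) 1 :=
    PySem.List.sorted_eq_of_perm_of_pairwise_lt l _ _ hperm.symm
      (PySem.List.pairwise_lt_pyRange_one s (e + 1))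
  rw [← h1, h2]

theorem foldl_flag (q : Int → Bool) : ∀ (l : List Int) (b : Bool),
    l.foldl (fun iso r => if iso then q r else iso) b = (b && l.all q) := by
  intro l
  induction l with
  | nil => intro b; simp
  | cons x xs ih =>
    intro b
    rw [List.foldl_cons, ih]
    cases b <;> simp

theorem foldl_id {α β : Type} (l : List α) (f : β → α → β)
    (h : ∀ x ∈ l, ∀ o, f o x = o) : ∀ o, l.foldl f o = o := by
  induction l with
  | nil => intro o; simp
  | cons x xs ih =>
    intro o
    rw [List.foldl_cons, h x (by simp)]
    exact ih (fun y hy o => h y (by simp [hy]) o) o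

theorem transform_colAB (grid : List (List Int)) (H W bg fill : Int)
    (out : List (List Int)) (col : Int) (h0 : 0 ≤ col) (hW : col < W) :
    pvColA grid H W bg fill out col = pvColB grid H W bg fill out col := by
  simp only [pvColA, pvColB]
  have hvals : ∀ r : Int, 0 ≤ r → r < H →
      PySem.List.pyGetD ((PySem.List.pyRange 0 H 1).map (fun r => pvCell grid r col)) r 0
        = pvCell grid r col :=
    fun r h1 h2 => PySem.List.pyGetD_map_pyRange_of_nonneg _ H r 0 h1 h2
  have hfilter : (PySem.List.pyRange 0 H 1).filter
      (fun r => !(PySem.List.pyGetD ((PySem.List.pyRange 0 H 1).map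
        (fun r => pvCell grid r col)) r 0 == bg))
      = (PySem.List.pyRange 0 H 1).filter (fun r => !(pvCell grid r col == bg)) := by
    refine List.filter_congr (fun x hx => ?_)
    rcases PySem.List.mem_pyRange_one.mp hx with ⟨h1, h2⟩
    rw [hvals x h1 h2]
  rw [hfilter]
  set nb := (PySem.List.pyRange 0 H 1).filter (fun r => !(pvCell grid r col == bg)) with hnbdef
  by_cases hnb : nb = []
  · rw [if_pos hnb, if_pos hnb]
  rw [if_neg hnb, if_neg hnb]
  obtain ⟨a0, xs, hcons⟩ := List.exists_cons_of_ne_nil hnb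
  have hmem' : ∀ x : Int, x ∈ a0 :: xs ↔ 0 ≤ x ∧ x < H ∧ ¬ pvCell grid x col = bg := by
    intro x
    rw [← hcons, hnbdef, List.mem_filter, PySem.List.mem_pyRange_one]
    simp [and_assoc]
  have hpair : (a0 :: xs).Pairwise (· < ·) := by
    rw [← hcons, hnbdef]
    exact List.Pairwise.filter _ (PySem.List.pairwise_lt_pyRange_one 0 H)
  rw [hcons, pvSegments_cons, PySem.List.pyGetD_zero_cons, PySem.List.pyGet?_neg_one]
  set b0 := ((a0 :: xs).getLast?).getD 0 with hb0def
  have hb0mem : b0 ∈ a0 :: xs := by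
    rw [hb0def]
    rw [List.getLast?_eq_some_getLast (by simp)]
    exact List.getLast_mem _
  have ha0mem : a0 ∈ a0 :: xs := by simp
  have hb0bounds := (hmem' b0).mp hb0mem
  have ha0bounds := (hmem' a0).mp ha0mem
  by_cases hcont : a0 :: xs = PySem.List.pyRange a0 (b0 + 1) 1
  case neg =>
    rw [if_pos hcont]
    refine foldl_id _ _ (fun se hse o => ?_) out
    obtain ⟨s, e⟩ := se
    have hrun : ∀ r : Int, s ≤ r → r ≤ e → r ∈ a0 :: xs :=
      segGo_run xs a0 a0 s e (a0 :: xs)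
        (fun r h1 h2 => by
          have : r = a0 := le_antisymm h2 h1
          simp [this])
        (fun y hy => by simp [hy]) hse
    have hderive : (∀ x ∈ a0 :: xs, s ≤ x ∧ x ≤ e) → False := by
      intro hsub
      have heq := eq_pyRange_of _ s e hpair hsub hrun
      have hsle : s ≤ e := by
        by_contra hgt
        rw [PySem.List.pyRange_one_eq_nil (by omega)] at heq
        exact List.cons_ne_nil _ _ heq
      have hhead : a0 = s := by
        rw [PySem.List.pyRange_one_cons (by omega)] at heq
        exact (List.cons_eq_cons.mp heq).1
      have hlast : b0 = e := by
        rw [hb0def, heq, PySem.List.pyRange_one_succ_right hsle, List.getLast?_concat]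
        rfl
      exact hcont (by rw [heq, hhead, hlast])
    by_cases hs0 : s = (0:Int) <;> by_cases heH : e = H - 1
    · simp [hs0, heH]
    · have hgap : ((PySem.List.pyRange (e + 1) H 1).all fun r =>
          PySem.List.pyGetD (List.map (fun r => pvCell grid r col)
            (PySem.List.pyRange 0 H 1)) r 0 == bg) = false := by
        rw [Bool.eq_false_iff]
        intro hall
        rw [List.all_eq_true] at hall
        refine hderive (fun x hx => ?_)
        have hb := (hmem' x).mp hx
        refine ⟨by omega, ?_⟩
        by_contra hxe
        have hxr : x ∈ PySem.List.pyRange (e + 1) H 1 :=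
          PySem.List.mem_pyRange_one.mpr ⟨by omega, hb.2.1⟩
        have h2 := hall x hxr
        rw [hvals x hb.1 hb.2.1] at h2
        simp at h2
        exact hb.2.2 h2
      simp [hs0, heH, hgap]
    · have hgap : ((PySem.List.pyRange 0 s 1).all fun r =>
          PySem.List.pyGetD (List.map (fun r => pvCell grid r col)
            (PySem.List.pyRange 0 H 1)) r 0 == bg) = false := by
        rw [Bool.eq_false_iff]
        intro hall
        rw [List.all_eq_true] at hall
        refine hderive (fun x hx => ?_)
        have hb := (hmem' x).mp hx
        refine ⟨?_, by omega⟩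
        by_contra hxs
        have hxr : x ∈ PySem.List.pyRange 0 s 1 :=
          PySem.List.mem_pyRange_one.mpr ⟨hb.1, by omega⟩
        have h2 := hall x hxr
        rw [hvals x hb.1 hb.2.1] at h2
        simp at h2
        exact hb.2.2 h2
      simp [hs0, heH, hgap]
    · simp [hs0, heH]
  case pos =>
    rw [if_neg (fun h => h hcont)]
    have hchain : List.IsChain (fun u v => v = u + 1) (a0 :: xs) := by
      rw [hcont]; exact chain_pyRange_one _ a0 (b0 + 1) rfl
    rw [segGo_chain xs a0 a0 hchain, ← hb0def]
    simp only [List.foldl_cons, List.foldl_nil]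
    by_cases hTB : ((a0 == (0:Int)) == (b0 == H - 1)) = true
    · rw [if_pos hTB, if_pos hTB]
    · rw [if_neg hTB, if_neg hTB]
      have hmemr : ∀ x : Int, x ∈ a0 :: xs ↔ a0 ≤ x ∧ x < b0 + 1 := by
        intro x; rw [hcont]; exact PySem.List.mem_pyRange_one
      have ha0b0 : a0 ≤ b0 := by have := (hmemr a0).mp ha0mem; omega
      have hisoPt : ∀ r : Int,
          (if 0 < col ∧ ¬pvCell grid r (col - 1) = bg then false
           else if col < W - 1 ∧ ¬pvCell grid r (col + 1) = bg then false else true)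
          = ((col == 0 || pvCell grid r (col - 1) == bg) &&
             (col == W - 1 || pvCell grid r (col + 1) == bg)) := by
        intro r
        split_ifs with h1 h2
        · have hc0 : ¬ col = (0:Int) := by omega
          simp [hc0, h1.2]
        · have hcW : ¬ col = W - 1 := by omega
          simp [hcW, h2.2]
        · rw [not_and_or] at h1 h2
          simp only [not_not, not_lt] at h1 h2
          have e1 : ((col == (0:Int)) || pvCell grid r (col - 1) == bg) = true := by
            rcases h1 with h | h
            · have hc : col = 0 := by omega
              simp [hc]
            · simp [h]
          have e2 : ((col == W - 1) || pvCell grid r (col + 1) == bg) = true := by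
            rcases h2 with h | h
            · have hc : col = W - 1 := by omega
              simp [hc]
            · simp [h]
          rw [e1, e2]
          rfl
      by_cases ha00 : a0 = (0:Int)
      · have hclean : ((PySem.List.pyRange (b0 + 1) H 1).all fun r =>
            PySem.List.pyGetD (List.map (fun r => pvCell grid r col)
              (PySem.List.pyRange 0 H 1)) r 0 == bg) = true := by
          rw [List.all_eq_true]
          intro r hr
          rcases PySem.List.mem_pyRange_one.mp hr with ⟨h1, h2⟩
          rw [hvals r (by omega) h2]
          by_contra hc
          have hmem := (hmem' r).mpr ⟨by omega, h2, by simpa using hc⟩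
          have := (hmemr r).mp hmem
          omega
        rw [foldl_flag]
        simp only [ha00, hclean, beq_self_eq_true, if_true]
        rw [show (fun r : Int => if 0 < col ∧ ¬pvCell grid r (col - 1) = bg then false
              else if col < W - 1 ∧ ¬pvCell grid r (col + 1) = bg then false else true)
            = (fun r : Int => ((col == 0 || pvCell grid r (col - 1) == bg) &&
               (col == W - 1 || pvCell grid r (col + 1) == bg))) from funext hisoPt,
           Bool.true_and]
        simp
      · have hclean : ((PySem.List.pyRange 0 a0 1).all fun r =>
            PySem.List.pyGetD (List.map (fun r => pvCell grid r col)
              (PySem.List.pyRange 0 H 1)) r 0 == bg) = true := by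
          rw [List.all_eq_true]
          intro r hr
          rcases PySem.List.mem_pyRange_one.mp hr with ⟨h1, h2⟩
          rw [hvals r h1 (by omega)]
          by_contra hc
          have hmem := (hmem' r).mpr ⟨h1, by omega, by simpa using hc⟩
          have := (hmemr r).mp hmem
          omega
        rw [foldl_flag]
        simp only [hclean]
        rw [show (fun r : Int => if 0 < col ∧ ¬pvCell grid r (col - 1) = bg then false
              else if col < W - 1 ∧ ¬pvCell grid r (col + 1) = bg then false else true)
            = (fun r : Int => ((col == 0 || pvCell grid r (col - 1) == bg) &&
               (col == W - 1 || pvCell grid r (col + 1) == bg))) from funext hisoPt,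
           Bool.true_and]
        have ha0f : (a0 == (0:Int)) = false := by simp [ha00]
        simp [ha0f]

-- ===== VERDICT (by name: the statement is the Claim_ definition above) =====
theorem transform_spec : Claim_equal_transform := by
  intro grid _ _
  unfold Spec_transform transform transform_alt
  refine PySem.List.foldl_congr_mem _ _ _ _ (fun acc x hx => ?_)
  rcases (PySem.List.mem_pyRange_one.mp hx) with ⟨h1, h2⟩
  exact transform_colAB _ _ _ _ _ _ _ h1 h2
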